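-- pv_equiv track=rewrite | github.com/NLeSC/DiVE | python/SPEmbedding.py | CombinePrefixesInPath
-- ===== SOURCE A (Python) =====
-- def CombinePrefixesInPath(stringWithDots):# used only for the OMA data, because of its specific format
--     listje = stringWithDots.split('.')
--     path = []
--     i = 0
--     for item in listje:
--         if i==0:
--             prefix = item
--         else:
--             prefix = str(prefix + '.' + item)
--         path.append(prefix)
--         i+=1
--     return path
-- ===== SOURCE B (Python) =====
-- def CombinePrefixesInPath(stringWithDots):
--     parts = stringWithDots.split('.')
--     return ['.'.join(parts[:i + 1]) for i in range(len(parts))]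
-- ===== Notes on version B (the rewrite author's own statement) =====
-- stated objective: simpler
-- what changed: A threads a running prefix accumulator and a manual counter through a loop; B splits once and rebuilds each prefix independently as a dot-join of a growing slice of the parts, maintaining no running state.
import Mathlib
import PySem

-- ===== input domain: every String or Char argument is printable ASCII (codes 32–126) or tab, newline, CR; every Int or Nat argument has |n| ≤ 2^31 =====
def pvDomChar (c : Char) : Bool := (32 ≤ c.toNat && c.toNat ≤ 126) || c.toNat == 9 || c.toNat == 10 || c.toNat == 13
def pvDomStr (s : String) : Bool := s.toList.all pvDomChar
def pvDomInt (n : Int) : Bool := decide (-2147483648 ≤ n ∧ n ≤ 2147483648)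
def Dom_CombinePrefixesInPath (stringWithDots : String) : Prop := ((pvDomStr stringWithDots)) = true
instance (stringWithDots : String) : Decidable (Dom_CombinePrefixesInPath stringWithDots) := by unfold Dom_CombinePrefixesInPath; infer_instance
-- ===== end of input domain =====

-- B splits once and rebuilds each prefix independently from a slice ('.'.join(parts[:i+1]));
-- A instead threads a running prefix accumulator and counter through one loop. Objective: simpler.


-- ===== PORT A =====
-- loop body: state = (path, prefix, i); 'str(prefix + '.' + item)' is the concatenation itself
def pvStepA (acc : List String × String × Int) (item : String) : List String × String × Int :=
  let pfx := if acc.2.2 = 0 then item else acc.2.1 ++ "." ++ item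
  (acc.1 ++ [pfx], pfx, acc.2.2 + 1)

-- str.split('.') with nonempty sep: PySem.Str.split? is some here, getD's default is unreachable
def CombinePrefixesInPath (stringWithDots : String) : List String :=
  (((PySem.Str.split? stringWithDots ".").getD []).foldl pvStepA ([], "", 0)).1

-- ===== PORT B =====
def CombinePrefixesInPath_alt (stringWithDots : String) : List String :=
  (PySem.List.pyRange 0 ((PySem.Str.split? stringWithDots ".").getD []).length 1).map
    (fun i => PySem.Str.join "."
      (PySem.List.slice ((PySem.Str.split? stringWithDots ".").getD []) none (some (i + 1))))

-- ===== PRECONDITION & SPEC =====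
def Spec_CombinePrefixesInPath (stringWithDots : String) (out : List String) : Prop := out = CombinePrefixesInPath_alt stringWithDots
instance (stringWithDots : String) (out : List String) : Decidable (Spec_CombinePrefixesInPath stringWithDots out) := by unfold Spec_CombinePrefixesInPath; infer_instance

-- ===== CLAIM (what is proved, stated in full; the proofs are below) =====
def Claim_equal_CombinePrefixesInPath : Prop := ∀ (stringWithDots : String), Dom_CombinePrefixesInPath stringWithDots → Spec_CombinePrefixesInPath stringWithDots (CombinePrefixesInPath stringWithDots)

-- ===== LEMMAS AND PROOFS =====

-- join over a snoc on the Chars side, when the front is nonempty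
theorem pv_chars_join_append_singleton (l : List (List Char)) (c : List Char) (h : l ≠ []) :
    PySem.Chars.join ['.'] (l ++ [c]) = PySem.Chars.join ['.'] l ++ ['.'] ++ c := by
  induction l with
  | nil => exact absurd rfl h
  | cons a t ih =>
    cases t with
    | nil => simp [PySem.Chars.join_cons_cons, PySem.Chars.join_singleton]
    | cons b r =>
      have ihh := ih (by simp)
      simp only [List.cons_append] at ihh ⊢
      rw [PySem.Chars.join_cons_cons, ihh, PySem.Chars.join_cons_cons]
      simp

-- the same fact lifted to strings
theorem pv_join_append_singleton (xs : List String) (x : String) (h : xs ≠ []) :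
    PySem.Str.join "." (xs ++ [x]) = PySem.Str.join "." xs ++ "." ++ x := by
  have htl : (PySem.Str.join "." (xs ++ [x])).toList
      = (PySem.Str.join "." xs ++ "." ++ x).toList := by
    rw [PySem.Str.toList_join]
    simp only [String.toList_append, PySem.Str.toList_join]
    rw [List.map_append, List.map_singleton]
    exact pv_chars_join_append_singleton _ _ (by simpa using h)
  exact String.toList_injective htl

-- invariant of A's fold over a nonempty list
theorem pv_foldA (xs : List String) (h : xs ≠ []) :
    xs.foldl pvStepA ([], "", 0) =
      ((List.range xs.length).map (fun k => PySem.Str.join "." (xs.take (k + 1))),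
       PySem.Str.join "." xs, (xs.length : Int)) := by
  induction xs using List.reverseRecOn with
  | nil => exact absurd rfl h
  | append_singleton ys x ih =>
    cases ys with
    | nil =>
      have hx : PySem.Str.join "." [x] = x :=
        String.toList_injective (by rw [PySem.Str.toList_join]; simp [PySem.Chars.join_singleton])
      simp [pvStepA, hx, List.range_succ]
    | cons a t =>
      rw [List.foldl_append, ih (by simp), List.foldl_cons, List.foldl_nil]
      unfold pvStepA
      have hne : (a :: t) ≠ ([] : List String) := by simp
      have hlen : ((a :: t).length : Int) ≠ 0 := by
        simp only [List.length_cons]; push_cast; omega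
      rw [if_neg hlen]
      rw [← pv_join_append_singleton _ _ hne]
      refine Prod.ext ?_ (Prod.ext rfl (by push_cast; simp))
      · show _ ++ [PySem.Str.join "." ((a :: t) ++ [x])] = _
        rw [List.length_append, List.length_singleton, List.range_succ, List.map_append,
          List.map_singleton]
        congr 1
        · apply List.map_congr_left
          intro k hk
          simp only [List.mem_range] at hk
          rw [List.take_append_of_le_length (by omega)]
        · rw [List.take_of_length_le (by simp)]

-- B's map over pyRange is the same map over List.range
theorem pv_altB (xs : List String) :
    (PySem.List.pyRange 0 xs.length 1).map
        (fun i => PySem.Str.join "." (PySem.List.slice xs none (some (i + 1)))) =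
      (List.range xs.length).map (fun k => PySem.Str.join "." (xs.take (k + 1))) := by
  rw [PySem.List.pyRange_one, List.map_map]
  apply List.map_congr_left
  intro k hk
  simp only [Function.comp_apply, zero_add]
  have : ((k : Int) + 1) = ((k + 1 : Nat) : Int) := by push_cast; ring
  rw [this, PySem.List.slice_to_natCast]

-- ===== VERDICT (by name: the statement is the Claim_ definition above) =====
theorem CombinePrefixesInPath_spec : Claim_equal_CombinePrefixesInPath := by
  intro s _
  unfold Spec_CombinePrefixesInPath CombinePrefixesInPath CombinePrefixesInPath_alt
  rw [pv_altB]
  rcases h : (PySem.Str.split? s ".").getD [] with _ | ⟨a, t⟩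
  · simp
  · rw [pv_foldA _ (by simp)]
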